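-- pv_equiv track=rewrite | github.com/amamtura/misc | hackerrank/hackerrank_degreeOfAnArray.py | getLengthOfMinSubArrayMatchingDegreeOfArray
-- ===== SOURCE A (Python) =====
-- import collections
--
-- def getLengthOfMinSubArrayMatchingDegreeOfArray(listOfInts):
--     itemCounts = collections.Counter(listOfInts)
--     degree = max(itemCounts.values())
--     itemsListForDegree = [item for item, count in itemCounts.items() if count == degree]
--
--     reversedList = listOfInts[::-1]
--
--     lenCounts = []
--     for item in itemsListForDegree:
--         itemFirstIndex = listOfInts.index(item)
--         itemLastIndex = len(listOfInts) - reversedList.index(item) - 1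
--         lenCounts.append(itemLastIndex - itemFirstIndex + 1)
--     return min(lenCounts)
-- ===== SOURCE B (Python) =====
-- def getLengthOfMinSubArrayMatchingDegreeOfArray(listOfInts):
--     # Online one-pass: maintain running counts, first-seen index, the running
--     # degree of the prefix and the best window length so far; when an element's
--     # count exceeds the running degree the answer is reset, when it ties the
--     # answer is minimised. No candidate list, no second pass.
--     counts = {}
--     first = {}
--     degree = 0
--     best = 0
--     for i, x in enumerate(listOfInts):
--         if x not in first:
--             first[x] = i
--         c = counts.get(x, 0) + 1
--         counts[x] = c
--         if c > degree:
--             degree = c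
--             best = i - first[x] + 1
--         elif c == degree:
--             span = i - first[x] + 1
--             if span < best:
--                 best = span
--     return best
-- ===== Notes on version B (the rewrite author's own statement) =====
-- stated objective: alternative
-- what changed: B is a single online pass that maintains a running prefix degree and the current best window length (reset when the degree increases, minimised on ties), instead of A's staged computation of the full Counter, the candidate list, and per-candidate .index scans over the list and its reversal.
import Mathlib
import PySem

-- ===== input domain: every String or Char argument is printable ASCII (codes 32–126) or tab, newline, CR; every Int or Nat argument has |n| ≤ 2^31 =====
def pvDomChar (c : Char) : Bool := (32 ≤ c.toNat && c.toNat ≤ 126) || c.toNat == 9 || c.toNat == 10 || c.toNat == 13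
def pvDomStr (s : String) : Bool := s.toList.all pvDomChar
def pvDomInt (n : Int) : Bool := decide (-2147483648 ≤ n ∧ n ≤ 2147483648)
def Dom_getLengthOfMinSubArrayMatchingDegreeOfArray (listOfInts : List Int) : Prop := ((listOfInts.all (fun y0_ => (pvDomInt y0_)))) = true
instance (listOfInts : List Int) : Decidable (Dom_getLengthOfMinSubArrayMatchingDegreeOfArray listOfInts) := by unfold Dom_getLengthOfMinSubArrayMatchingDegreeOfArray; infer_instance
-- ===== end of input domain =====

-- B replaces A's staged passes (Counter, candidate list, per-candidate .index scans) with one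
-- online pass keeping a running prefix degree and best window length.

-- ===== PORT A =====
def getLengthOfMinSubArrayMatchingDegreeOfArray (listOfInts : List Int) : Int :=
  let itemCounts := PySem.Dict.counter listOfInts
  let degree := (PySem.List.max? itemCounts.values (fun y => y)).getD 0
  let itemsListForDegree := (itemCounts.items.filter (fun p => p.2 == degree)).map (fun p => p.1)
  let reversedList := (PySem.List.slice? listOfInts none none (-1)).getD []
  let lenCounts := itemsListForDegree.foldl (fun acc item =>
    let itemFirstIndex : Int := ((PySem.List.index? listOfInts item).getD 0 : Nat)
    let itemLastIndex : Int := (listOfInts.length : Int) - ((PySem.List.index? reversedList item).getD 0 : Nat) - 1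
    acc ++ [itemLastIndex - itemFirstIndex + 1]) []
  (PySem.List.min? lenCounts (fun y => y)).getD 0

-- ===== PORT B =====
-- state: (counts dict, first-index dict, running degree, best length)
def getLengthOfMinSubArrayMatchingDegreeOfArray_alt (listOfInts : List Int) : Int :=
  ((PySem.List.enumerate listOfInts 0).foldl
    (fun (s : PySem.Dict Int Int × PySem.Dict Int Int × Int × Int) p =>
      let first := if s.2.1.contains p.2 then s.2.1 else s.2.1.insert p.2 p.1
      let c := s.1.getD p.2 0 + 1
      if c > s.2.2.1 then
        (s.1.insert p.2 c, first, c, p.1 - first.getD p.2 0 + 1)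
      else if c == s.2.2.1 then
        let span := p.1 - first.getD p.2 0 + 1
        (s.1.insert p.2 c, first, s.2.2.1, if span < s.2.2.2 then span else s.2.2.2)
      else
        (s.1.insert p.2 c, first, s.2.2.1, s.2.2.2))
    (PySem.Dict.empty, PySem.Dict.empty, 0, 0)).2.2.2

-- ===== PRECONDITION & SPEC =====
-- Pre_ excludes only the empty list, on which Python A raises ValueError (max() of an empty sequence).
def Pre_getLengthOfMinSubArrayMatchingDegreeOfArray (listOfInts : List Int) : Prop := listOfInts ≠ []
instance (listOfInts : List Int) : Decidable (Pre_getLengthOfMinSubArrayMatchingDegreeOfArray listOfInts) := by unfold Pre_getLengthOfMinSubArrayMatchingDegreeOfArray; infer_instance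
def pvWitness_getLengthOfMinSubArrayMatchingDegreeOfArray : List Int := [1, 2, 2, 3, 1]
def Spec_getLengthOfMinSubArrayMatchingDegreeOfArray (listOfInts : List Int) (out : Int) : Prop := out = getLengthOfMinSubArrayMatchingDegreeOfArray_alt listOfInts
instance (listOfInts : List Int) (out : Int) : Decidable (Spec_getLengthOfMinSubArrayMatchingDegreeOfArray listOfInts out) := by unfold Spec_getLengthOfMinSubArrayMatchingDegreeOfArray; infer_instance

-- ===== CLAIM (what is proved, stated in full; the proofs are below) =====
def Claim_equal_getLengthOfMinSubArrayMatchingDegreeOfArray : Prop := ∀ (listOfInts : List Int), Dom_getLengthOfMinSubArrayMatchingDegreeOfArray listOfInts → Pre_getLengthOfMinSubArrayMatchingDegreeOfArray listOfInts → Spec_getLengthOfMinSubArrayMatchingDegreeOfArray listOfInts (getLengthOfMinSubArrayMatchingDegreeOfArray listOfInts)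

-- ===== LEMMAS AND PROOFS =====

-- The span A computes for an element k of xs (last index − first index + 1, both via index scans).
def spanOf (xs : List Int) (k : Int) : Int :=
  ((xs.length : Int) - ((PySem.List.index? xs.reverse k).getD 0 : Nat) - 1)
    - ((PySem.List.index? xs k).getD 0 : Nat) + 1

-- d is the degree of xs.
def IsDeg (xs : List Int) (d : Int) : Prop :=
  (∃ k ∈ xs, (xs.count k : Int) = d) ∧ ∀ k ∈ xs, (xs.count k : Int) ≤ d

-- a is the minimal span among the degree elements of xs.
def IsAns (xs : List Int) (d a : Int) : Prop :=
  (∃ k ∈ xs, (xs.count k : Int) = d ∧ spanOf xs k = a) ∧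
    ∀ k ∈ xs, (xs.count k : Int) = d → a ≤ spanOf xs k

theorem IsDeg_unique (xs : List Int) (d d' : Int) (h : IsDeg xs d) (h' : IsDeg xs d') : d = d' := by
  obtain ⟨⟨k, hk, hc⟩, hb⟩ := h
  obtain ⟨⟨k', hk', hc'⟩, hb'⟩ := h'
  have h1 := hb' k hk
  have h2 := hb k' hk'
  omega

theorem IsAns_unique (xs : List Int) (d a a' : Int) (h : IsAns xs d a) (h' : IsAns xs d a') : a = a' := by
  obtain ⟨⟨k, hk, hc, hs⟩, hb⟩ := h
  obtain ⟨⟨k', hk', hc', hs'⟩, hb'⟩ := h'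
  have h1 := hb' k hk hc
  have h2 := hb k' hk' hc'
  omega

-- B's step and fold, named for the proofs (alt xs = (bFold xs).2.2.2 by rfl).
def bStep (s : PySem.Dict Int Int × PySem.Dict Int Int × Int × Int) (p : Int × Int) :
    PySem.Dict Int Int × PySem.Dict Int Int × Int × Int :=
  let first := if s.2.1.contains p.2 then s.2.1 else s.2.1.insert p.2 p.1
  let c := s.1.getD p.2 0 + 1
  if c > s.2.2.1 then
    (s.1.insert p.2 c, first, c, p.1 - first.getD p.2 0 + 1)
  else if c == s.2.2.1 then
    let span := p.1 - first.getD p.2 0 + 1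
    (s.1.insert p.2 c, first, s.2.2.1, if span < s.2.2.2 then span else s.2.2.2)
  else
    (s.1.insert p.2 c, first, s.2.2.1, s.2.2.2)

def bFold (xs : List Int) : PySem.Dict Int Int × PySem.Dict Int Int × Int × Int :=
  (PySem.List.enumerate xs 0).foldl bStep (PySem.Dict.empty, PySem.Dict.empty, 0, 0)

theorem alt_eq_bFold (xs : List Int) :
    getLengthOfMinSubArrayMatchingDegreeOfArray_alt xs = (bFold xs).2.2.2 := rfl

-- The first-index dict as its own fold.
def firstD (xs : List Int) : PySem.Dict Int Int :=
  (PySem.List.enumerate xs 0).foldl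
    (fun d p => if d.contains p.2 then d else d.insert p.2 p.1) PySem.Dict.empty

-- The first two components of bFold are independent of the (degree, best) components.
theorem bFold_components (l : List (Int × Int)) (c f : PySem.Dict Int Int) (d a : Int) :
    (l.foldl bStep (c, f, d, a)).1
        = l.foldl (fun dd p => dd.insert p.2 (dd.getD p.2 0 + 1)) c ∧
      (l.foldl bStep (c, f, d, a)).2.1
        = l.foldl (fun dd p => if dd.contains p.2 then dd else dd.insert p.2 p.1) f := by
  induction l generalizing c f d a with
  | nil => exact ⟨rfl, rfl⟩
  | cons p t ih =>
    simp only [List.foldl_cons]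
    have hstep : bStep (c, f, d, a) p =
        (c.insert p.2 (c.getD p.2 0 + 1),
         (if f.contains p.2 then f else f.insert p.2 p.1),
         (bStep (c, f, d, a) p).2.2) := by
      simp only [bStep]
      split_ifs <;> rfl
    rw [hstep]
    exact ih _ _ _ _

theorem bFold_counts (xs : List Int) : (bFold xs).1 = PySem.Dict.counter xs := by
  rw [bFold, (bFold_components (PySem.List.enumerate xs 0) _ _ 0 0).1]
  calc (PySem.List.enumerate xs 0).foldl (fun dd p => dd.insert p.2 (dd.getD p.2 0 + 1)) PySem.Dict.empty
      = ((PySem.List.enumerate xs 0).map (fun p => p.2)).foldl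
          (fun (dd : PySem.Dict Int Int) x => dd.insert x (dd.getD x 0 + 1)) PySem.Dict.empty := by
        rw [List.foldl_map]
    _ = PySem.Dict.counter xs := by
        rw [PySem.List.map_snd_enumerate, PySem.Dict.foldl_insert_getD_add_one_eq_counter]

theorem bFold_first (xs : List Int) : (bFold xs).2.1 = firstD xs :=
  (bFold_components (PySem.List.enumerate xs 0) _ _ 0 0).2

theorem bFold_append (pre : List Int) (x : Int) :
    bFold (pre ++ [x]) = bStep (bFold pre) ((pre.length : Int), x) := by
  rw [bFold, PySem.List.enumerate_append, List.foldl_append]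
  simp [PySem.List.enumerate_cons, bFold]

theorem firstD_append (pre : List Int) (x : Int) :
    firstD (pre ++ [x])
      = if (firstD pre).contains x then firstD pre
        else (firstD pre).insert x (pre.length : Int) := by
  rw [firstD, PySem.List.enumerate_append, List.foldl_append]
  simp [PySem.List.enumerate_cons, firstD]

-- Lookup in the first-index fold is the index of the first occurrence.
theorem firstD_getD (xs : List Int) (s : Int) (f0 : PySem.Dict Int Int) (v d : Int) :
    ((PySem.List.enumerate xs s).foldl
        (fun (dd : PySem.Dict Int Int) p => if dd.contains p.2 then dd else dd.insert p.2 p.1) f0).getD v d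
    = if f0.contains v then f0.getD v d
      else match PySem.List.index? xs v with
           | some k => s + (k : Int)
           | none => d := by
  induction xs generalizing s f0 with
  | nil =>
    simp only [PySem.List.enumerate_nil, List.foldl_nil, PySem.List.index?_eq_idxOf?, List.idxOf?_nil]
    by_cases hfv : f0.contains v = true
    · simp [hfv]
    · simp [hfv, PySem.Dict.getD_of_not_contains f0 d (by simpa using hfv)]
  | cons x t ih =>
    rw [PySem.List.enumerate_cons, List.foldl_cons, ih]
    by_cases hfx : f0.contains x = true
    · simp only [hfx, if_true]
      by_cases hfv : f0.contains v = true
      · simp [hfv]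
      · simp only [hfv, Bool.false_eq_true, if_false]
        by_cases hvx : v = x
        · subst hvx; simp [hfv] at hfx
        · rw [PySem.List.index?_cons_of_ne t (Ne.symm hvx)]
          cases PySem.List.index? t v <;> simp <;> ring_nf
    · simp only [hfx, Bool.false_eq_true, if_false]
      by_cases hvx : v = x
      · subst hvx
        rw [PySem.List.index?_cons_self]
        have hc : (f0.insert v s).contains v = true := PySem.Dict.contains_insert_self f0 v s
        simp [hc, PySem.Dict.getD_insert_self, by simpa using hfx]
      · have hc : (f0.insert x s).contains v = f0.contains v := by
          rw [PySem.Dict.contains_insert]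
          simp [show (v == x) = false from by simp [hvx]]
        rw [hc]
        by_cases hfv : f0.contains v = true
        · simp [hfv, PySem.Dict.getD_insert_of_ne f0 s d hvx]
        · simp only [hfv, Bool.false_eq_true, if_false]
          rw [PySem.List.index?_cons_of_ne t (Ne.symm hvx)]
          cases PySem.List.index? t v <;> simp <;> ring_nf

theorem firstD_getD_mem (xs : List Int) (v : Int) (hv : v ∈ xs) :
    ∃ k : Nat, PySem.List.index? xs v = some k ∧ (firstD xs).getD v 0 = (k : Int) := by
  obtain ⟨k, hk⟩ := Option.isSome_iff_exists.mp ((PySem.List.index?_isSome_iff xs v).mpr hv)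
  refine ⟨k, hk, ?_⟩
  rw [firstD, firstD_getD, hk]
  simp

-- spans are unchanged for old elements when a different element is appended
theorem spanOf_append_ne (pre : List Int) (x k : Int) (hne : k ≠ x) (hk : k ∈ pre) :
    spanOf (pre ++ [x]) k = spanOf pre k := by
  obtain ⟨i, hi⟩ := Option.isSome_iff_exists.mp ((PySem.List.index?_isSome_iff pre k).mpr hk)
  obtain ⟨j, hj⟩ := Option.isSome_iff_exists.mp
    ((PySem.List.index?_isSome_iff pre.reverse k).mpr (List.mem_reverse.mpr hk))
  have h1 : PySem.List.index? (pre ++ [x]) k = some i := by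
    rw [PySem.List.index?_append_of_mem [x] hk, hi]
  have h2 : PySem.List.index? (pre ++ [x]).reverse k = some (j + 1) := by
    rw [List.reverse_append, List.reverse_singleton, List.singleton_append,
      PySem.List.index?_cons_of_ne pre.reverse (Ne.symm hne), hj]
    rfl
  simp only [spanOf, h1, h2, hi, hj, Option.getD_some, List.length_append, List.length_singleton]
  push_cast
  ring

theorem spanOf_append_self (pre : List Int) (x : Int) (k : Nat)
    (hk : PySem.List.index? (pre ++ [x]) x = some k) :
    spanOf (pre ++ [x]) x = (pre.length : Int) - (k : Int) + 1 := by
  have h2 : PySem.List.index? (pre ++ [x]).reverse x = some 0 := by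
    rw [List.reverse_append, List.reverse_singleton, List.singleton_append,
      PySem.List.index?_cons_self]
  simp only [spanOf, hk, h2, Option.getD_some, List.length_append, List.length_singleton]
  push_cast
  ring

theorem count_append_singleton (pre : List Int) (x k : Int) :
    (pre ++ [x]).count k = pre.count k + if k = x then 1 else 0 := by
  rw [List.count_append]
  by_cases h : k = x
  · simp [h]
  · have h' : ¬ x = k := fun hh => h hh.symm
    simp [h, h']

-- Main invariant: bFold's (degree, best) components are the degree of the prefix and the
-- minimal span among its degree elements.
theorem bFold_degAns (xs : List Int) :
    (xs = [] ∧ (bFold xs).2.2.1 = 0 ∧ (bFold xs).2.2.2 = 0) ∨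
      (IsDeg xs (bFold xs).2.2.1 ∧ IsAns xs (bFold xs).2.2.1 (bFold xs).2.2.2) := by
  induction xs using List.reverseRecOn with
  | nil => exact Or.inl ⟨rfl, rfl, rfl⟩
  | append_singleton pre x ih =>
    right
    rw [bFold_append]
    have hc : (bFold pre).1 = PySem.Dict.counter pre := bFold_counts pre
    have hf : (bFold pre).2.1 = firstD pre := bFold_first pre
    -- the count of x in pre ++ [x] is the incremented dict count
    have hcnew : ((pre ++ [x]).count x : Int) = (bFold pre).1.getD x 0 + 1 := by
      rw [hc, PySem.Dict.getD_counter, count_append_singleton]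
      simp
    have hcold : ((pre.count x : Int)) = (bFold pre).1.getD x 0 := by
      rw [hc, PySem.Dict.getD_counter]
    -- the first-index lookup used by the step
    have hxmem : x ∈ pre ++ [x] := List.mem_append_right pre (List.mem_singleton.mpr rfl)
    obtain ⟨kf, hkf, hgetf⟩ := firstD_getD_mem (pre ++ [x]) x hxmem
    have hfirstdict :
        (if (bFold pre).2.1.contains x then (bFold pre).2.1
          else (bFold pre).2.1.insert x ((pre.length : Int))) = firstD (pre ++ [x]) := by
      rw [hf, firstD_append]
    have hspanx : spanOf (pre ++ [x]) x
        = (pre.length : Int) - (firstD (pre ++ [x])).getD x 0 + 1 := by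
      rw [hgetf, spanOf_append_self pre x kf hkf]
    -- counts of other elements unchanged
    have hcount_ne : ∀ k, k ≠ x → ((pre ++ [x]).count k : Int) = (pre.count k : Int) := by
      intro k hk
      rw [count_append_singleton]
      simp [hk]
    -- old degree bound (vacuous when pre = [])
    have hboundD : ∀ k ∈ pre, (pre.count k : Int) ≤ (bFold pre).2.2.1 := by
      rcases ih with ⟨hnil, hD0, _⟩ | ⟨⟨_, hb⟩, _⟩
      · intro k hk; rw [hnil] at hk; cases hk
      · exact hb
    simp only [bStep, hfirstdict]
    split_ifs with hgt heq hlt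
    all_goals dsimp only
    · -- degree increases: only x can reach the new count
      constructor
      · constructor
        · exact ⟨x, hxmem, hcnew⟩
        · intro k hkmem
          rcases List.mem_append.mp hkmem with hkp | hkx
          · by_cases hkex : k = x
            · subst hkex; omega
            · rw [hcount_ne k hkex]; have := hboundD k hkp; omega
          · have : k = x := List.mem_singleton.mp hkx
            subst this; omega
      · constructor
        · exact ⟨x, hxmem, hcnew, hspanx⟩
        · intro k hkmem hkc
          by_cases hkex : k = x
          · subst hkex; rw [hspanx]
          · exfalso
            rcases List.mem_append.mp hkmem with hkp | hkx
            · rw [hcount_ne k hkex] at hkc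
              have := hboundD k hkp; omega
            · exact hkex (List.mem_singleton.mp hkx)
    -- in the remaining branches the new count is ≤ the old degree, so pre ≠ [] and the
    -- invariant's right branch holds; the old witnesses differ from x
    all_goals
      (have hc1 : (1 : Int) ≤ (bFold pre).1.getD x 0 + 1 := by
        have h0 : (0 : Int) ≤ (pre.count x : Int) := Int.natCast_nonneg _
        omega)
    all_goals
      (have hinv : IsDeg pre (bFold pre).2.2.1 ∧
          IsAns pre (bFold pre).2.2.1 (bFold pre).2.2.2 := by
        rcases ih with ⟨hnil, hD0, _⟩ | h
        · exfalso; omega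
        · exact h)
    all_goals
      (obtain ⟨⟨⟨k0, hk0mem, hk0c⟩, hbd⟩, ⟨⟨k1, hk1mem, hk1c, hk1s⟩, hba⟩⟩ := hinv)
    all_goals
      (have hk0x : k0 ≠ x := by intro h; subst h; omega)
    all_goals
      (have hk1x : k1 ≠ x := by intro h; subst h; omega)
    all_goals
      (have hk0mem' : k0 ∈ pre ++ [x] := List.mem_append_left _ hk0mem;
       have hk1mem' : k1 ∈ pre ++ [x] := List.mem_append_left _ hk1mem;
       have hk0c' : ((pre ++ [x]).count k0 : Int) = (bFold pre).2.2.1 := by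
         rw [hcount_ne k0 hk0x]; exact hk0c;
       have hk1c' : ((pre ++ [x]).count k1 : Int) = (bFold pre).2.2.1 := by
         rw [hcount_ne k1 hk1x]; exact hk1c;
       have hk1s' : spanOf (pre ++ [x]) k1 = (bFold pre).2.2.2 := by
         rw [spanOf_append_ne pre x k1 hk1x hk1mem]; exact hk1s;
       have hdegNew : IsDeg (pre ++ [x]) (bFold pre).2.2.1 := by
         refine ⟨⟨k0, hk0mem', hk0c'⟩, ?_⟩
         intro k hkmem
         rcases List.mem_append.mp hkmem with hkp | hkx
         · by_cases hkex : k = x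
           · subst hkex; omega
           · rw [hcount_ne k hkex]; exact hbd k hkp
         · have : k = x := List.mem_singleton.mp hkx
           subst this; omega)
    · -- tie with the running degree, new span is smaller: best is replaced
      rw [beq_iff_eq] at heq
      refine ⟨hdegNew, ⟨x, hxmem, by omega, hspanx⟩, ?_⟩
      intro k hkmem hkc
      by_cases hkex : k = x
      · subst hkex; rw [hspanx]
      · rcases List.mem_append.mp hkmem with hkp | hkx
        · rw [hcount_ne k hkex] at hkc
          rw [spanOf_append_ne pre x k hkex hkp]
          have := hba k hkp hkc; omega
        · exact absurd (List.mem_singleton.mp hkx) hkex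
    · -- tie with the running degree, new span not smaller: best is kept
      rw [beq_iff_eq] at heq
      refine ⟨hdegNew, ⟨k1, hk1mem', hk1c', hk1s'⟩, ?_⟩
      intro k hkmem hkc
      by_cases hkex : k = x
      · subst hkex; rw [hspanx]; omega
      · rcases List.mem_append.mp hkmem with hkp | hkx
        · rw [hcount_ne k hkex] at hkc
          rw [spanOf_append_ne pre x k hkex hkp]
          exact hba k hkp hkc
        · exact absurd (List.mem_singleton.mp hkx) hkex
    · -- the new count is strictly below the degree: nothing changes
      simp only [beq_iff_eq] at heq
      refine ⟨hdegNew, ⟨k1, hk1mem', hk1c', hk1s'⟩, ?_⟩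
      intro k hkmem hkc
      by_cases hkex : k = x
      · subst hkex; omega
      · rcases List.mem_append.mp hkmem with hkp | hkx
        · rw [hcount_ne k hkex] at hkc
          rw [spanOf_append_ne pre x k hkex hkp]
          exact hba k hkp hkc
        · exact absurd (List.mem_singleton.mp hkx) hkex

-- A's result also satisfies IsDeg/IsAns for the same degree value.
theorem A_degAns (xs : List Int) (hne : xs ≠ []) :
    ∃ d, IsDeg xs d ∧ IsAns xs d (getLengthOfMinSubArrayMatchingDegreeOfArray xs) := by
  have hvals : (PySem.Dict.counter xs).values
      = (PySem.Set.ofList xs).map (fun k => (xs.count k : Int)) := by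
    simp only [PySem.Dict.values, PySem.Dict.items_counter, List.map_map, Function.comp_def]
  obtain ⟨y, hy⟩ : ∃ y, y ∈ xs := by
    cases xs with
    | nil => exact absurd rfl hne
    | cons a t => exact ⟨a, List.mem_cons_self ..⟩
  have hyS : y ∈ PySem.Set.ofList xs := (PySem.Set.mem_ofList xs y).mpr hy
  cases hmax : PySem.List.max? (PySem.Dict.counter xs).values (fun y => y) with
  | none =>
    exfalso
    rw [PySem.List.max?_eq_none_iff, hvals, List.map_eq_nil_iff] at hmax
    rw [hmax] at hyS
    cases hyS
  | some m =>
    have hmmem : m ∈ (PySem.Dict.counter xs).values := PySem.List.max?_mem hmax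
    rw [hvals] at hmmem
    obtain ⟨k0, hk0S, hk0c⟩ := List.mem_map.mp hmmem
    have hk0 : k0 ∈ xs := (PySem.Set.mem_ofList xs k0).mp hk0S
    have hbound : ∀ k ∈ xs, (xs.count k : Int) ≤ m := by
      intro k hk
      have hmem : (xs.count k : Int) ∈ (PySem.Dict.counter xs).values := by
        rw [hvals]
        exact List.mem_map.mpr ⟨k, (PySem.Set.mem_ofList xs k).mpr hk, rfl⟩
      exact PySem.List.max?_isMax hmax _ hmem
    refine ⟨m, ⟨⟨k0, hk0, hk0c⟩, hbound⟩, ?_⟩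
    simp only [getLengthOfMinSubArrayMatchingDegreeOfArray, hmax, Option.getD_some,
      PySem.List.slice?_none_none_neg_one, PySem.Dict.items_counter, List.filter_map,
      List.map_map, PySem.List.foldl_append_singleton_eq_map, List.nil_append,
      Function.comp_def, List.map_id']
    show IsAns xs m
      ((PySem.List.min?
        (((PySem.Set.ofList xs).filter (fun k => ((xs.count k : Int) == m))).map (spanOf xs))
        (fun y => y)).getD 0)
    have hk0L : k0 ∈ (PySem.Set.ofList xs).filter (fun k => ((xs.count k : Int) == m)) :=
      List.mem_filter.mpr ⟨hk0S, by rw [beq_iff_eq]; exact hk0c⟩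
    cases hmin : PySem.List.min?
        (((PySem.Set.ofList xs).filter (fun k => ((xs.count k : Int) == m))).map (spanOf xs))
        (fun y => y) with
    | none =>
      exfalso
      rw [PySem.List.min?_eq_none_iff, List.map_eq_nil_iff] at hmin
      rw [hmin] at hk0L
      cases hk0L
    | some a =>
      simp only [Option.getD_some]
      have hamem := PySem.List.min?_mem hmin
      obtain ⟨k1, hk1L, hk1s⟩ := List.mem_map.mp hamem
      obtain ⟨hk1S, hk1c⟩ := List.mem_filter.mp hk1L
      refine ⟨⟨k1, (PySem.Set.mem_ofList xs k1).mp hk1S, by rwa [beq_iff_eq] at hk1c, hk1s⟩, ?_⟩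
      intro k hk hkc
      have hmem : spanOf xs k ∈
          (((PySem.Set.ofList xs).filter (fun k => ((xs.count k : Int) == m))).map (spanOf xs)) :=
        List.mem_map.mpr ⟨k,
          List.mem_filter.mpr ⟨(PySem.Set.mem_ofList xs k).mpr hk, by rw [beq_iff_eq]; exact hkc⟩, rfl⟩
      exact PySem.List.min?_isMin hmin _ hmem

-- ===== VERDICT (by name: the statement is the Claim_ definition above) =====
theorem getLengthOfMinSubArrayMatchingDegreeOfArray_spec : Claim_equal_getLengthOfMinSubArrayMatchingDegreeOfArray := by
  intro xs _ hne
  unfold Spec_getLengthOfMinSubArrayMatchingDegreeOfArray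
  obtain ⟨d, hAdeg, hAans⟩ := A_degAns xs hne
  rcases bFold_degAns xs with ⟨hnil, _, _⟩ | ⟨hBdeg, hBans⟩
  · exact absurd hnil hne
  · rw [alt_eq_bFold]
    have hd := IsDeg_unique xs d _ hAdeg hBdeg
    rw [hd] at hAans
    exact IsAns_unique xs _ _ _ hAans hBans
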